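-- pv_equiv track=rewrite | github.com/jfulghum/practice_thy_algos | dictionaries_sets/can_match_fellows.py | canMatchFellows
-- ===== SOURCE A (Python) =====
-- def canMatchFellows(ratingbyFellow):
--     result = set()
--     for _, value in ratingbyFellow.items():
--         if value in result:
--             result.remove(value)
--         else:
--             result.add(value)
--     return not result
-- ===== SOURCE B (Python) =====
-- def canMatchFellows(ratingbyFellow):
--     counts = {}
--     for value in ratingbyFellow.values():
--         counts[value] = counts.get(value, 0) + 1
--     return all(c % 2 == 0 for c in counts.values())
-- ===== Notes on version B (the rewrite author's own statement) =====
-- stated objective: idiomatic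
-- what changed: Replaces the toggled presence set (in/remove/add branch, then emptiness test) with a frequency table built in one pass over the values followed by a parity check over the tallied counts.
import Mathlib
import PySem

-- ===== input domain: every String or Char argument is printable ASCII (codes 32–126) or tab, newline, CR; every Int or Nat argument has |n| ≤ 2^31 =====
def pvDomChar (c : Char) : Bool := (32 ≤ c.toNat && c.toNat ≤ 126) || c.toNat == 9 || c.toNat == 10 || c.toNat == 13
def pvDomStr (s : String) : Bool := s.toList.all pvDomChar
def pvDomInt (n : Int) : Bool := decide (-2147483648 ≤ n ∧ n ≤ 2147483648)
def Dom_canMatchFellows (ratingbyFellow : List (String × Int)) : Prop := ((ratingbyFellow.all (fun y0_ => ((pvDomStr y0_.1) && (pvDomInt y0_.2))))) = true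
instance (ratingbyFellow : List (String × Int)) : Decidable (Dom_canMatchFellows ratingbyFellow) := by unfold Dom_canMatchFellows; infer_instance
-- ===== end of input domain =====

-- B replaces A's toggled presence set with a value-frequency table checked for all-even counts (idiomatic; same O(n) cost).

-- ===== PORT A =====
-- 'result.remove(value)' runs only under the 'value in result' guard, so it never raises;
-- PySem.Set.discard is exact there.
def canMatchFellows (ratingbyFellow : List (String × Int)) : Bool :=
  let result :=
    ratingbyFellow.foldl
      (fun s kv =>
        if PySem.Set.contains s kv.2 then PySem.Set.discard s kv.2
        else PySem.Set.add s kv.2)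
      PySem.Set.empty
  result.isEmpty

-- ===== PORT B =====
def canMatchFellows_alt (ratingbyFellow : List (String × Int)) : Bool :=
  let counts :=
    ratingbyFellow.foldl
      (fun d kv => d.insert kv.2 (d.getD kv.2 0 + 1))
      (PySem.Dict.empty : PySem.Dict Int Int)
  counts.values.all (fun c => PySem.Int.mod c 2 == 0)

-- ===== PRECONDITION & SPEC =====
def Spec_canMatchFellows (ratingbyFellow : List (String × Int)) (out : Bool) : Prop := out = canMatchFellows_alt ratingbyFellow
instance (ratingbyFellow : List (String × Int)) (out : Bool) : Decidable (Spec_canMatchFellows ratingbyFellow out) := by unfold Spec_canMatchFellows; infer_instance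

-- ===== CLAIM (what is proved, stated in full; the proofs are below) =====
def Claim_equal_canMatchFellows : Prop := ∀ (ratingbyFellow : List (String × Int)), Dom_canMatchFellows ratingbyFellow → Spec_canMatchFellows ratingbyFellow (canMatchFellows ratingbyFellow)

-- ===== LEMMAS AND PROOFS =====

-- A's loop toggles membership: after the fold, x is in the set iff x occurred an odd number of times.
theorem mem_toggle_foldl (vs : List Int) (s : List Int) (x : Int) :
    (x ∈ vs.foldl
        (fun s v => if PySem.Set.contains s v then PySem.Set.discard s v else PySem.Set.add s v) s)
      ↔ (x ∈ s ↔ vs.count x % 2 = 0) := by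
  induction vs generalizing s with
  | nil => simp
  | cons v t ih =>
    simp only [List.foldl_cons, ih]
    by_cases hxv : x = v
    · subst hxv
      by_cases hxs : x ∈ s <;>
        · simp only [PySem.Set.contains, PySem.Set.mem_discard,
            List.count_cons_self, hxs, List.contains_eq_mem,
            if_true, decide_true, decide_false]
          simp [hxs]
          omega
    · have hc : ((v :: t).count x) = (t.count x) := by
        simp [Ne.symm hxv]
      rw [hc]
      by_cases hvs : v ∈ s <;>
        simp [PySem.Set.contains, PySem.Set.mem_discard, hvs, hxv]

theorem canMatchFellows_eq_alt (r : List (String × Int)) :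
    canMatchFellows r = canMatchFellows_alt r := by
  unfold canMatchFellows canMatchFellows_alt
  have hB : r.foldl (fun (d : PySem.Dict Int Int) kv => d.insert kv.2 (d.getD kv.2 0 + 1))
        PySem.Dict.empty
      = PySem.Dict.counter (r.map Prod.snd) := by
    rw [← PySem.Dict.foldl_insert_getD_add_one_eq_counter]
    simp [List.foldl_map]
  have hA : r.foldl
        (fun s kv => if PySem.Set.contains s kv.2 then PySem.Set.discard s kv.2
          else PySem.Set.add s kv.2) PySem.Set.empty
      = (r.map Prod.snd).foldl
        (fun s v => if PySem.Set.contains s v then PySem.Set.discard s v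
          else PySem.Set.add s v) PySem.Set.empty := by
    simp [List.foldl_map]
  simp only [hA, hB]
  set vs := r.map Prod.snd with hvs
  rw [Bool.eq_iff_iff]
  have hleft : ((vs.foldl
        (fun s v => if PySem.Set.contains s v then PySem.Set.discard s v
          else PySem.Set.add s v) PySem.Set.empty).isEmpty = true)
      ↔ ∀ x : Int, vs.count x % 2 = 0 := by
    rw [List.isEmpty_iff, List.eq_nil_iff_forall_not_mem]
    constructor
    · intro h x
      have := h x
      rw [mem_toggle_foldl] at this
      simp only [PySem.Set.empty, List.not_mem_nil, false_iff] at this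
      omega
    · intro h x
      rw [mem_toggle_foldl]
      simp [PySem.Set.empty, h x]
  have hright : ((PySem.Dict.counter vs).values.all (fun c => PySem.Int.mod c 2 == 0) = true)
      ↔ ∀ k ∈ vs, vs.count k % 2 = 0 := by
    rw [PySem.Dict.values_eq_map_keys _ (PySem.Dict.nodup_keys_counter vs) 0,
      PySem.Dict.keys_counter]
    simp only [List.all_map, List.all_eq_true, Function.comp,
      PySem.Dict.getD_counter, PySem.Set.mem_ofList, beq_iff_eq]
    constructor
    · intro h k hk
      have := h k hk
      rw [PySem.Int.mod_eq_emod_of_pos (by norm_num)] at this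
      omega
    · intro h k hk
      rw [PySem.Int.mod_eq_emod_of_pos (by norm_num)]
      have := h k hk
      omega
  rw [hleft, hright]
  constructor
  · intro h k _; exact h k
  · intro h x
    by_cases hx : x ∈ vs
    · exact h x hx
    · simp [List.count_eq_zero_of_not_mem hx]

-- ===== VERDICT (by name: the statement is the Claim_ definition above) =====
theorem canMatchFellows_spec : Claim_equal_canMatchFellows := by
  intro r _
  exact canMatchFellows_eq_alt r
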